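-- pv_equiv track=rewrite | github.com/evoloyeu/reganalysis | aggregatePredictionResults.py | groupCourses
-- ===== SOURCE A (Python) =====
-- def groupCourses(values, crsSortIndex, numSortIndex):
-- 	valueDict = {}
-- 	for row in values:
-- 		key = row[crsSortIndex]+row[numSortIndex]
-- 		if key in valueDict:
-- 			valueDict[key].append(row)
-- 		else:
-- 			valueDict[key] = [row]
--
-- 	return valueDict
-- ===== SOURCE B (Python) =====
-- def groupCourses(values, crsSortIndex, numSortIndex):
--     keys = [row[crsSortIndex] + row[numSortIndex] for row in values]
--     seen = set()
--     order = []
--     for k in keys: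
--         if k not in seen:
--             seen.add(k)
--             order.append(k)
--     return {k: [row for row, kk in zip(values, keys) if kk == k] for k in order}
-- ===== Notes on version B (the rewrite author's own statement) =====
-- stated objective: alternative
-- what changed: B precomputes the key list once, derives the first-occurrence order of distinct keys with a seen-set, and builds the result with one comprehension per distinct key scanning the zipped rows, instead of A's single pass that appends each row into a growing dict bucket.
import Mathlib
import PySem

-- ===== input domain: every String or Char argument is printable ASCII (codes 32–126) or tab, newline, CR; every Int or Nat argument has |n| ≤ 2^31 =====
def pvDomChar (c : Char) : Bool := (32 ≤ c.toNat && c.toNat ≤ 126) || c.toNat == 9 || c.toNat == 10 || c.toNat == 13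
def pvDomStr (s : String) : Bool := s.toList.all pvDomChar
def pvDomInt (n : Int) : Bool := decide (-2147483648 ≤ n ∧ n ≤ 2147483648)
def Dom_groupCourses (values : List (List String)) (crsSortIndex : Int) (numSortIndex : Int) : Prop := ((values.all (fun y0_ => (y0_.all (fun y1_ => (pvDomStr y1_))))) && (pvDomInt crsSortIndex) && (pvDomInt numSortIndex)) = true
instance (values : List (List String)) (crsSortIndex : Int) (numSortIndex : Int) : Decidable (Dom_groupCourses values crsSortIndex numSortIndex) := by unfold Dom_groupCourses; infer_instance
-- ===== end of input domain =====

-- B replaces A's one-pass bucket-appending dict build by: precompute the key list, extract the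
-- first-occurrence order of distinct keys, then build each group by a scan of the zipped rows
-- (objective: alternative decomposition, same result).

-- ===== PORT A =====
def groupCourses (values : List (List String)) (crsSortIndex : Int) (numSortIndex : Int) : List (String × List (List String)) :=
  (values.foldl
    (fun (d : PySem.Dict String (List (List String))) row =>
      let key := PySem.List.pyGetD row crsSortIndex "" ++ PySem.List.pyGetD row numSortIndex ""
      if d.contains key then d.insert key (d.getD key [] ++ [row])
      else d.insert key [row])
    PySem.Dict.empty).items

-- ===== PORT B =====
def groupCourses_alt (values : List (List String)) (crsSortIndex : Int) (numSortIndex : Int) : List (String × List (List String)) :=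
  let keys := values.map (fun row => PySem.List.pyGetD row crsSortIndex "" ++ PySem.List.pyGetD row numSortIndex "")
  let so := keys.foldl
    (fun (p : PySem.Set String × List String) k =>
      if PySem.Set.contains p.1 k then p else (PySem.Set.add p.1 k, p.2 ++ [k]))
    (PySem.Set.empty, [])
  (so.2.foldl
    (fun (d : PySem.Dict String (List (List String))) k =>
      d.insert k (((values.zip keys).filter (fun p => p.2 == k)).map (·.1)))
    PySem.Dict.empty).items

-- ===== PRECONDITION & SPEC =====
-- Pre_ excludes exactly the inputs where Python A raises IndexError: some row not indexable
-- at crsSortIndex or numSortIndex.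
def Pre_groupCourses (values : List (List String)) (crsSortIndex : Int) (numSortIndex : Int) : Prop :=
  ∀ row ∈ values, PySem.Raise.InRange row.length crsSortIndex ∧ PySem.Raise.InRange row.length numSortIndex
instance (values : List (List String)) (crsSortIndex : Int) (numSortIndex : Int) : Decidable (Pre_groupCourses values crsSortIndex numSortIndex) := by unfold Pre_groupCourses; infer_instance

def pvWitness_groupCourses : List (List String) × Int × Int :=
  ([["CSC", "110"], ["CSC", "110"], ["MAT", "101"]], 0, 1)

def Spec_groupCourses (values : List (List String)) (crsSortIndex : Int) (numSortIndex : Int) (out : List (String × List (List String))) : Prop := out = groupCourses_alt values crsSortIndex numSortIndex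
instance (values : List (List String)) (crsSortIndex : Int) (numSortIndex : Int) (out : List (String × List (List String))) : Decidable (Spec_groupCourses values crsSortIndex numSortIndex out) := by unfold Spec_groupCourses; infer_instance

-- ===== CLAIM (what is proved, stated in full; the proofs are below) =====
def Claim_equal_groupCourses : Prop := ∀ (values : List (List String)) (crsSortIndex : Int) (numSortIndex : Int), Dom_groupCourses values crsSortIndex numSortIndex → Pre_groupCourses values crsSortIndex numSortIndex → Spec_groupCourses values crsSortIndex numSortIndex (groupCourses values crsSortIndex numSortIndex)

-- ===== LEMMAS AND PROOFS =====

-- canonical form both sides reach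
def pvGroups (values : List (List String)) (K : List String → String) : List (String × List (List String)) :=
  (PySem.Set.ofList (values.map K)).map (fun k => (k, values.filter (fun r => K r == k)))

theorem A_char (values : List (List String)) (c n : Int) :
    groupCourses values c n =
      pvGroups values (fun row => PySem.List.pyGetD row c "" ++ PySem.List.pyGetD row n "") := by
  set K : List String → String := fun row => PySem.List.pyGetD row c "" ++ PySem.List.pyGetD row n "" with hK
  have hstep : (fun (d : PySem.Dict String (List (List String))) row =>
      let key := PySem.List.pyGetD row c "" ++ PySem.List.pyGetD row n ""
      if d.contains key then d.insert key (d.getD key [] ++ [row])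
      else d.insert key [row])
      = fun d row => d.modify (K row) [] (fun l => l ++ [row]) := by
    funext d row
    simp only [PySem.Dict.modify, hK]
    by_cases h : d.contains (PySem.List.pyGetD row c "" ++ PySem.List.pyGetD row n "") = true
    · simp [h]
    · simp only [Bool.not_eq_true] at h
      simp [h, PySem.Dict.getD_of_not_contains _ _ h]
  unfold groupCourses
  rw [hstep]
  have hd := fun (dd : PySem.Dict String (List (List String))) =>
    PySem.Dict.keys_foldl_modify_key values K [] (fun _ row l => l ++ [row]) dd
  have hkeys : (values.foldl (fun d row => d.modify (K row) [] (fun l => l ++ [row])) PySem.Dict.empty).keys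
      = PySem.Set.ofList (values.map K) := by
    rw [hd PySem.Dict.empty]
    simp [PySem.Set.update, PySem.Set.ofList_eq_foldl, PySem.Dict.keys_empty]
  have hnd : (values.foldl (fun d row => d.modify (K row) [] (fun l => l ++ [row])) PySem.Dict.empty).keys.Nodup := by
    exact PySem.Dict.nodup_keys_foldl_modify_key values K [] (fun _ row l => l ++ [row]) _ (by simp)
  rw [PySem.Dict.items_eq_map_keys _ hnd [], hkeys]
  unfold pvGroups
  apply List.map_congr_left
  intro k hk
  have hfold : (values.foldl (fun d row => d.modify (K row) [] (fun l => l ++ [row])) PySem.Dict.empty)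
      = ((values.map (fun r => (K r, r))).foldl (fun d p => d.modify p.1 [] (fun l => l ++ [p.2])) PySem.Dict.empty) := by
    rw [List.foldl_map]
  rw [hfold, PySem.Dict.getD_foldl_modify_append]
  simp [List.filter_map, List.map_map, Function.comp_def]

theorem pairFold (ks : List String) (s : List String) :
    ks.foldl (fun (p : PySem.Set String × List String) k =>
      if PySem.Set.contains p.1 k then p else (PySem.Set.add p.1 k, p.2 ++ [k])) (s, s)
    = (PySem.Set.update s ks, PySem.Set.update s ks) := by
  induction ks generalizing s with
  | nil => simp [PySem.Set.update]
  | cons k ks ih =>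
    simp only [List.foldl_cons]
    have hstep : (if PySem.Set.contains s k then ((s : PySem.Set String), s)
        else (PySem.Set.add s k, s ++ [k])) = (PySem.Set.add s k, PySem.Set.add s k) := by
      by_cases hm : k ∈ s <;> simp [PySem.Set.add, hm]
    rw [hstep, ih]
    simp [PySem.Set.update]

theorem B_char (values : List (List String)) (c n : Int) :
    groupCourses_alt values c n =
      pvGroups values (fun row => PySem.List.pyGetD row c "" ++ PySem.List.pyGetD row n "") := by
  set K : List String → String := fun row => PySem.List.pyGetD row c "" ++ PySem.List.pyGetD row n "" with hK
  unfold groupCourses_alt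
  simp only
  rw [show (PySem.Set.empty : PySem.Set String) = ([] : List String) from rfl]
  rw [pairFold]
  have horder : PySem.Set.update ([] : List String) (values.map K) = PySem.Set.ofList (values.map K) := by
    simp [PySem.Set.update, PySem.Set.ofList_eq_foldl]
  simp only
  rw [horder]
  rw [PySem.Dict.items_foldl_insert_fresh (PySem.Set.ofList (values.map K)) (fun k => k)
      (fun k => ((values.zip (values.map K)).filter (fun p => p.2 == k)).map (·.1)) PySem.Dict.empty
      (fun a _ => PySem.Dict.contains_empty a)
      (by simp [PySem.Set.nodup_ofList])]
  unfold pvGroups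
  rw [show (PySem.Dict.empty : PySem.Dict String (List (List String))).items = [] from rfl, List.nil_append]
  apply List.map_congr_left
  intro k hk
  have hzip : values.zip (values.map K) = values.map (fun r => (r, K r)) := by
    simpa using @List.zip_map' _ _ _ id K values
  rw [hzip]
  simp [List.filter_map, List.map_map, Function.comp_def]

-- ===== VERDICT (by name: the statement is the Claim_ definition above) =====
theorem groupCourses_spec : Claim_equal_groupCourses := by
  intro values c n _ _
  unfold Spec_groupCourses
  rw [A_char, B_char]
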